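-- pv_equiv track=rewrite | github.com/furiosa-ai/TABED | tabed/utils/util_evaluation.py | _connect_consecutive_ids
-- ===== SOURCE A (Python) =====
-- def _connect_consecutive_ids(sequences_decoded_factorized):
--     # Initialize an empty list to store the final output
--     output = []
--
--     # Initialize variables to keep track of the current label and concatenated text
--     current_label = sequences_decoded_factorized[0][1]
--     current_text = sequences_decoded_factorized[0][0]
--
--     # Iterate through the sequence starting from the second element
--     for item, label, _ in sequences_decoded_factorized[1:]:
--         if label == current_label:
--             # If the label is the same as the current label, concatenate the text
--             current_text += " " + item
--         else:
--             # If the label changes, append the current text and label to the output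
--             if current_label:
--                 # Bold if it is an accepted token generated from draft model
--                 output.append("**"+current_text.strip()+"**")
--             else:
--                 output.append(current_text.strip())
--             # Update the current label and text
--             current_label = label
--             current_text = item
--
--     # Append the last group to the output
--     if current_label:
--         # Bold if it is an accepted token generated from draft model
--         output.append("**"+current_text.strip()+"**")
--     else:
--         output.append(current_text.strip())
--
--     return output
-- ===== SOURCE B (Python) =====
-- def _connect_consecutive_ids(sequences_decoded_factorized):
--     # Two-phase: first split into maximal runs of equal label, then format each run.
--     runs = []  # list of (label, [items])
--     for item, label, _ in sequences_decoded_factorized: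
--         if runs and runs[-1][0] == label:
--             runs[-1][1].append(item)
--         else:
--             runs.append((label, [item]))
--     result = []
--     for label, items in runs:
--         text = " ".join(items).strip()
--         result.append("**" + text + "**" if label else text)
--     return result
-- ===== Notes on version B (the rewrite author's own statement) =====
-- stated objective: alternative
-- what changed: B first groups the sequence into maximal runs of equal label (a list of (label, items) runs) and then formats each run by joining its items, instead of A's single pass that interleaves string concatenation, flushing and label tracking.
import Mathlib
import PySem

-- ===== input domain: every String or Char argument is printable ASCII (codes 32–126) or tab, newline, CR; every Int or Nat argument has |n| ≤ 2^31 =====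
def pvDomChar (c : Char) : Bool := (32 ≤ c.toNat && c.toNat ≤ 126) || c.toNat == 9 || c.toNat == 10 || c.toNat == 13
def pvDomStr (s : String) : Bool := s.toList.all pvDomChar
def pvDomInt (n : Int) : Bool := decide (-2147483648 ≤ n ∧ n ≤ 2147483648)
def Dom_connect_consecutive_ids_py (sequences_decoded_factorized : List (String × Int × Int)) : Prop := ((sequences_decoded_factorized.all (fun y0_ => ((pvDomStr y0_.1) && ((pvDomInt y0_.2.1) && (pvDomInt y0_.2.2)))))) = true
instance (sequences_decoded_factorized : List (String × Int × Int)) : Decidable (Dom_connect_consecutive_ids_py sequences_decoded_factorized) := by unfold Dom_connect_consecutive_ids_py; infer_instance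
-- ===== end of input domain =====

-- ===== PORT A =====
-- B groups the input into maximal equal-label runs first, then formats each run; return-value equivalence only (neither mutates).
-- format of a flushed group in A: bold when the label is truthy (non-zero)
def pvFmtA (cl : Int) (ct : String) : String :=
  if cl ≠ 0 then "**" ++ PySem.Str.strip ct ++ "**" else PySem.Str.strip ct

-- one iteration of A's for-loop: state = (current_label, current_text, output)
def pvStepA (st : Int × String × List String) (x : String × Int × Int) : Int × String × List String :=
  if x.2.1 == st.1 then (st.1, st.2.1 ++ " " ++ x.1, st.2.2)
  else (x.2.1, x.1, st.2.2 ++ [pvFmtA st.1 st.2.1])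

def connect_consecutive_ids_py (sequences_decoded_factorized : List (String × Int × Int)) : List String :=
  match sequences_decoded_factorized with
  | [] => []  -- unreachable under Pre_: Python raises IndexError here
  | t0 :: rest =>
    let r := rest.foldl pvStepA (t0.2.1, t0.1, [])
    r.2.2 ++ [pvFmtA r.1 r.2.1]

-- ===== PORT B =====
-- one iteration of B's first loop: extend the last run or start a new one
def pvStepB (runs : List (Int × List String)) (x : String × Int × Int) : List (Int × List String) :=
  match runs.getLast? with
  | some (l, its) =>
    if x.2.1 == l then runs.dropLast ++ [(l, its ++ [x.1])] else runs ++ [(x.2.1, [x.1])]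
  | none => [(x.2.1, [x.1])]

-- B's second loop: format one run
def pvFmtB (r : Int × List String) : String :=
  let text := PySem.Str.strip (PySem.Str.join " " r.2)
  if r.1 ≠ 0 then "**" ++ text ++ "**" else text

def connect_consecutive_ids_py_alt (sequences_decoded_factorized : List (String × Int × Int)) : List String :=
  (sequences_decoded_factorized.foldl pvStepB []).map pvFmtB

-- ===== PRECONDITION & SPEC =====
-- Pre_ excludes only the empty list, on which A raises IndexError (B naturally returns [] there).
def Pre_connect_consecutive_ids_py (sequences_decoded_factorized : List (String × Int × Int)) : Prop :=
  sequences_decoded_factorized ≠ []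
instance (sequences_decoded_factorized : List (String × Int × Int)) : Decidable (Pre_connect_consecutive_ids_py sequences_decoded_factorized) := by unfold Pre_connect_consecutive_ids_py; infer_instance

def pvWitness_connect_consecutive_ids_py : (List (String × Int × Int)) := [("a", 1, 0), ("b", 1, 1), ("c", 0, 2)]

def Spec_connect_consecutive_ids_py (sequences_decoded_factorized : List (String × Int × Int)) (out : List String) : Prop := out = connect_consecutive_ids_py_alt sequences_decoded_factorized
instance (sequences_decoded_factorized : List (String × Int × Int)) (out : List String) : Decidable (Spec_connect_consecutive_ids_py sequences_decoded_factorized out) := by unfold Spec_connect_consecutive_ids_py; infer_instance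

-- ===== CLAIM (what is proved, stated in full; the proofs are below) =====
def Claim_equal_connect_consecutive_ids_py : Prop := ∀ (sequences_decoded_factorized : List (String × Int × Int)), Dom_connect_consecutive_ids_py sequences_decoded_factorized → Pre_connect_consecutive_ids_py sequences_decoded_factorized → Spec_connect_consecutive_ids_py sequences_decoded_factorized (connect_consecutive_ids_py sequences_decoded_factorized)

-- ===== LEMMAS AND PROOFS =====

-- join over a snoc of a nonempty list appends sep ++ item (List Char level)
theorem pv_chars_join_snoc (sep : List Char) (ps : List (List Char)) (h : ps ≠ []) (q : List Char) :
    PySem.Chars.join sep (ps ++ [q]) = PySem.Chars.join sep ps ++ sep ++ q := by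
  induction ps with
  | nil => exact absurd rfl h
  | cons p ps ih =>
    cases ps with
    | nil => simp [PySem.Chars.join_cons_cons, PySem.Chars.join_singleton]
    | cons p2 ps2 =>
      have := ih (by simp)
      simp only [List.cons_append, PySem.Chars.join_cons_cons] at *
      simp [this, List.append_assoc]

-- " ".join over a snoc of a nonempty list appends " " ++ item
theorem pv_join_snoc (its : List String) (h : its ≠ []) (item : String) :
    PySem.Str.join " " (its ++ [item]) = PySem.Str.join " " its ++ " " ++ item := by
  apply String.toList_injective
  simp only [PySem.Str.toList_join, String.toList_append, List.map_append, List.map_cons,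
    List.map_nil]
  exact pv_chars_join_snoc _ _ (by simpa using h) _

theorem pv_join_singleton (item : String) : PySem.Str.join " " [item] = item := by
  apply String.toList_injective
  simp [PySem.Str.toList_join, PySem.Chars.join_singleton]

theorem pv_stepB_ne_nil (R : List (Int × List String)) (x : String × Int × Int) :
    pvStepB R x ≠ [] := by
  unfold pvStepB
  cases hR : R.getLast? with
  | none => simp
  | some a => obtain ⟨l, its⟩ := a; by_cases hx : x.2.1 == l <;> simp [hx]

-- pvStepB only inspects/edits the tail run: a nonempty suffix can be factored out
theorem pv_foldl_stepB_append (rest : List (String × Int × Int)) :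
    ∀ (P R : List (Int × List String)), R ≠ [] →
    List.foldl pvStepB (P ++ R) rest = P ++ List.foldl pvStepB R rest := by
  induction rest with
  | nil => intro P R h; simp
  | cons x xs ih =>
    intro P R h
    simp only [List.foldl_cons]
    have hstep : pvStepB (P ++ R) x = P ++ pvStepB R x := by
      obtain ⟨a, ha⟩ : ∃ a, R.getLast? = some a := by
        cases hR : R.getLast? with
        | none => exact absurd (List.getLast?_eq_none_iff.mp hR) h
        | some a => exact ⟨a, rfl⟩
      unfold pvStepB
      rw [List.getLast?_append, ha]
      obtain ⟨l, its⟩ := a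
      by_cases hx : x.2.1 == l
      · have hdl : (P ++ R).dropLast = P ++ R.dropLast := by
          rw [List.dropLast_append]; simp [List.isEmpty_iff, h]
        simp [hx, hdl, Option.some_or]
      · simp [hx, Option.some_or]
    rw [hstep, ih P (pvStepB R x) (pv_stepB_ne_nil R x)]

-- loop invariant tying A's running state to B's run list
theorem pv_main (rest : List (String × Int × Int)) :
    ∀ (cl : Int) (its : List String) (out : List String), its ≠ [] →
    (let r := rest.foldl pvStepA (cl, PySem.Str.join " " its, out)
     r.2.2 ++ [pvFmtA r.1 r.2.1])
      = out ++ (List.foldl pvStepB [(cl, its)] rest).map pvFmtB := by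
  induction rest with
  | nil =>
    intro cl its out h
    simp [pvFmtA, pvFmtB]
  | cons x xs ih =>
    intro cl its out h
    simp only [List.foldl_cons]
    by_cases hx : x.2.1 == cl
    · have hA : pvStepA (cl, PySem.Str.join " " its, out) x
          = (cl, PySem.Str.join " " (its ++ [x.1]), out) := by
        simp [pvStepA, hx, pv_join_snoc its h x.1]
      have hB : pvStepB [(cl, its)] x = [(cl, its ++ [x.1])] := by
        simp [pvStepB, hx]
      rw [hA, hB]
      exact ih cl (its ++ [x.1]) out (by simp)
    · have hA : pvStepA (cl, PySem.Str.join " " its, out) x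
          = (x.2.1, x.1, out ++ [pvFmtA cl (PySem.Str.join " " its)]) := by
        simp [pvStepA, hx]
      have hB : pvStepB [(cl, its)] x = [(cl, its)] ++ [(x.2.1, [x.1])] := by
        simp [pvStepB, hx]
      rw [hA, hB, pv_foldl_stepB_append xs [(cl, its)] [(x.2.1, [x.1])] (by simp)]
      have := ih x.2.1 [x.1] (out ++ [pvFmtA cl (PySem.Str.join " " its)]) (by simp)
      rw [pv_join_singleton] at this
      simp only [this, List.map_cons, List.map_append, List.map_nil]
      simp [pvFmtA, pvFmtB, List.append_assoc]

-- ===== VERDICT (by name: the statement is the Claim_ definition above) =====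
theorem connect_consecutive_ids_py_spec : Claim_equal_connect_consecutive_ids_py := by
  intro s _ hpre
  unfold Spec_connect_consecutive_ids_py
  match s with
  | [] => exact absurd rfl hpre
  | (t0 :: rest) =>
    show (let r := rest.foldl pvStepA (t0.2.1, t0.1, [])
          r.2.2 ++ [pvFmtA r.1 r.2.1]) = _
    have h := pv_main rest t0.2.1 [t0.1] [] (by simp)
    rw [pv_join_singleton] at h
    simpa [connect_consecutive_ids_py_alt, pvStepB] using h
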